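-- pv_equiv track=rewrite | github.com/NuageRoue/CUPGE1 | SR/finalProject/VProf/morpion.py | WinHor
-- ===== SOURCE A (Python) =====
-- def WinHor(grid,player):
--     lenGrid = len(grid)
--     for line in grid:
--         for i in range(lenGrid):
--             if line[i] == player:
--                 looked = i
--                 align = 0
--                 while looked < lenGrid and line[looked] == player:
--                     looked += 1
--                     align += 1
--                 if align == 5:
--                     return True
--     return False
-- ===== SOURCE B (Python) =====
-- def WinHor(grid, player):
--     n = len(grid)
--     for line in grid:
--         run = 0
--         for cell in line[:n]:
--             if cell == player:
--                 run += 1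
--                 if run == 5:
--                     return True
--             else:
--                 run = 0
--     return False
-- ===== Notes on version B (the rewrite author's own statement) =====
-- stated objective: alternative
-- what changed: Replaced A's restart-and-recount of the run from every player cell (a nested while inside the index loop, quadratic in a row full of player marks) by a single pass per row that keeps one running counter, resets on mismatch and stops at 5.
import Mathlib
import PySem

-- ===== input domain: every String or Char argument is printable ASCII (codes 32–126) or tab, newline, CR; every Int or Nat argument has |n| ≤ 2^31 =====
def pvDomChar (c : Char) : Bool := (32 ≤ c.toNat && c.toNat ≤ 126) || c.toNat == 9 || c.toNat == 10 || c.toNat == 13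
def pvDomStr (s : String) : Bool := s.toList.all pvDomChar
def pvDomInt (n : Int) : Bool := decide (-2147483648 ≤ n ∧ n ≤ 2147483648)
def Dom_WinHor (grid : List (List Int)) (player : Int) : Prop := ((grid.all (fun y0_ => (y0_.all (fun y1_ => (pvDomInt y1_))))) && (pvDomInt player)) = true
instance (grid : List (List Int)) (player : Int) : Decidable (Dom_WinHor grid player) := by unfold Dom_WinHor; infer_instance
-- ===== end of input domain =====

-- B replaces A's per-cell restart-and-recount of the run with one single-counter pass per row (alternative algorithm); equality proved on grids whose rows are at least as long as the grid (A indexes row[i] for i < len(grid) and raises otherwise).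

-- ===== PORT A =====
-- while looked < lenGrid and line[looked] == player: looked += 1; align += 1
-- (pyGet? = none is Python's IndexError; Pre_ keeps every access in range)
def pvWhileA (line : List Int) (player : Int) (n : Nat) (looked align : Nat) : Nat :=
  if h : looked < n ∧ PySem.List.pyGet? line (looked : Int) = some player then
    pvWhileA line player n (looked + 1) (align + 1)
  else align
termination_by n - looked
decreasing_by omega

-- for i in range(lenGrid): if line[i] == player: … if align == 5: return True
def pvRowA (line : List Int) (player : Int) (n : Nat) : Bool :=
  (List.range n).foldl (fun acc (i : Nat) =>
    acc || (if PySem.List.pyGet? line (i : Int) = some player then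
              pvWhileA line player n i 0 == 5
            else false)) false

def WinHor (grid : List (List Int)) (player : Int) : Bool :=
  let lenGrid := grid.length
  grid.foldl (fun acc line => acc || pvRowA line player lenGrid) false

-- ===== PORT B =====
-- for cell in line[:n]: run += 1 / reset, return True at run == 5
def pvRunScan (player : Int) : List Int → Nat → Bool
  | [], _ => false
  | c :: rest, run =>
    if c = player then
      (if run + 1 = 5 then true else pvRunScan player rest (run + 1))
    else pvRunScan player rest 0

def WinHor_alt (grid : List (List Int)) (player : Int) : Bool :=
  let n := grid.length
  grid.foldl (fun acc line =>
    acc || pvRunScan player (PySem.List.slice line none (some (n : Int))) 0) false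

-- ===== PRECONDITION & SPEC =====
-- A reads line[i] for every i < len(grid): a row shorter than the grid raises IndexError; exactly those inputs are excluded.
def Pre_WinHor (grid : List (List Int)) (player : Int) : Prop :=
  ∀ line ∈ grid, grid.length ≤ line.length
instance (grid : List (List Int)) (player : Int) : Decidable (Pre_WinHor grid player) := by
  unfold Pre_WinHor; infer_instance

def pvWitness_WinHor : List (List Int) × Int := ([[1, 1, 1, 1, 1], [1, 1, 1, 1, 1], [1, 0, 1, 0, 1], [0, 0, 0, 0, 0], [1, 1, 1, 1, 1]], 1)

def Spec_WinHor (grid : List (List Int)) (player : Int) (out : Bool) : Prop := out = WinHor_alt grid player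
instance (grid : List (List Int)) (player : Int) (out : Bool) : Decidable (Spec_WinHor grid player out) := by unfold Spec_WinHor; infer_instance

-- ===== CLAIM (what is proved, stated in full; the proofs are below) =====
def Claim_equal_WinHor : Prop := ∀ (grid : List (List Int)) (player : Int), Dom_WinHor grid player → Pre_WinHor grid player → Spec_WinHor grid player (WinHor grid player)

-- ===== LEMMAS AND PROOFS =====

-- length of the maximal prefix of player marks
def pvLead (player : Int) : List Int → Nat
  | [] => 0
  | c :: rest => if c = player then pvLead player rest + 1 else 0

-- the maximal run of player marks seen during B's scan, given current run r
def pvBest (player : Int) : List Int → Nat → Nat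
  | [], r => r
  | c :: rest, r => if c = player then pvBest player rest (r + 1) else max r (pvBest player rest 0)

theorem pvLead_le_best (player : Int) : ∀ (l : List Int) (r : Nat), r + pvLead player l ≤ pvBest player l r := by
  intro l
  induction l with
  | nil => intro r; simp [pvLead, pvBest]
  | cons c rest ih =>
    intro r
    by_cases h : c = player
    · simp only [pvLead, pvBest, if_pos h]
      have := ih (r + 1); omega
    · simp only [pvLead, pvBest, if_neg h]
      have := ih 0; omega

theorem pvRunScan_iff_best (player : Int) : ∀ (l : List Int) (r : Nat), r < 5 →
    (pvRunScan player l r = true ↔ 5 ≤ pvBest player l r) := by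
  intro l
  induction l with
  | nil =>
    intro r hr
    simp only [pvRunScan, pvBest]
    constructor
    · intro h; cases h
    · intro h; omega
  | cons c rest ih =>
    intro r hr
    by_cases h : c = player
    · simp only [pvRunScan, pvBest, if_pos h]
      by_cases h5 : r + 1 = 5
      · rw [if_pos h5]
        have := pvLead_le_best player rest (r + 1)
        constructor
        · intro _; omega
        · intro _; rfl
      · rw [if_neg h5]
        exact ih (r + 1) (by omega)
    · simp only [pvRunScan, pvBest, if_neg h]
      rw [ih 0 (by omega)]
      omega

theorem pvLead_drop_le_best (player : Int) : ∀ (l : List Int) (i r : Nat),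
    pvLead player (l.drop i) ≤ pvBest player l r := by
  intro l
  induction l with
  | nil => intro i r; simp [pvLead, pvBest]
  | cons c rest ih =>
    intro i r
    cases i with
    | zero =>
      have h := pvLead_le_best player (c :: rest) r
      simpa using le_trans (by omega) h
    | succ j =>
      rw [List.drop_succ_cons]
      by_cases h : c = player
      · rw [show pvBest player (c :: rest) r = pvBest player rest (r + 1) by simp [pvBest, h]]
        exact ih j (r + 1)
      · rw [show pvBest player (c :: rest) r = max r (pvBest player rest 0) by simp [pvBest, h]]
        exact le_trans (ih j 0) (le_max_right _ _)

theorem pvBest_extract (player : Int) : ∀ (l : List Int) (r : Nat),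
    pvBest player l r ≤ r + pvLead player l ∨ ∃ i, pvBest player l r ≤ pvLead player (l.drop i) := by
  intro l
  induction l with
  | nil => intro r; left; simp [pvLead, pvBest]
  | cons c rest ih =>
    intro r
    by_cases h : c = player
    · simp only [pvBest, pvLead, if_pos h]
      rcases ih (r + 1) with h1 | ⟨i, hi⟩
      · left; omega
      · right; exact ⟨i + 1, by simpa using hi⟩
    · simp only [pvBest, pvLead, if_neg h]
      by_cases hb : pvBest player rest 0 ≤ r
      · left; omega
      · rcases ih 0 with h1 | ⟨i, hi⟩
        · right; refine ⟨1, ?_⟩; simp only [List.drop_succ_cons, List.drop_zero]; omega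
        · right; refine ⟨i + 1, ?_⟩; simp only [List.drop_succ_cons]; omega

theorem pvLead_pos_head (player : Int) (l : List Int) (h : 0 < pvLead player l) :
    ∃ t, l = player :: t ∧ pvLead player t = pvLead player l - 1 := by
  cases l with
  | nil => simp [pvLead] at h
  | cons c t =>
    by_cases hc : c = player
    · exact ⟨t, by simp [hc], by simp [pvLead, hc]⟩
    · simp [pvLead, hc] at h

theorem pvFind5 (player : Int) : ∀ (L : Nat), 5 ≤ L → ∀ (w : List Int) (i : Nat),
    pvLead player (w.drop i) = L →
    ∃ j, w[j]? = some player ∧ pvLead player (w.drop j) = 5 := by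
  intro L
  induction L with
  | zero => intro h; omega
  | succ m ih =>
    intro h5 w i hL
    rcases pvLead_pos_head player (w.drop i) (by omega) with ⟨t, ht, hlt⟩
    by_cases hm : 5 ≤ m
    · have hdrop : w.drop (i + 1) = t := by
        have h1 : (w.drop i).drop 1 = t := by rw [ht]; simp
        simpa [List.drop_drop, Nat.add_comm] using h1
      exact ih hm w (i + 1) (by rw [hdrop]; omega)
    · have hi : w[i]? = some player := by
        have h0 : (w.drop i)[0]? = some player := by rw [ht]; simp
        simpa using h0
      exact ⟨i, hi, by omega⟩

theorem pvWhileA_eq_lead (row : List Int) (player : Int) (n : Nat) (hn : n ≤ row.length) :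
    ∀ (k looked align : Nat), k = n - looked → looked ≤ n →
    pvWhileA row player n looked align = align + pvLead player ((row.take n).drop looked) := by
  intro k
  induction k with
  | zero =>
    intro looked align hk hle
    have hln : looked = n := by omega
    rw [pvWhileA]
    have hd : (row.take n).drop looked = [] := by
      apply List.drop_eq_nil_of_le; simp; omega
    simp [pvLead, hln]
  | succ m ih =>
    intro looked align hk hle
    have hlt : looked < n := by omega
    obtain ⟨c, hc⟩ : ∃ c, row[looked]? = some c :=
      ⟨_, List.getElem?_eq_getElem (by omega)⟩
    have hget : PySem.List.pyGet? row (looked : Int) = some c := by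
      simpa using hc
    have hdrop : (row.take n).drop looked = c :: (row.take n).drop (looked + 1) := by
      apply List.ext_getElem?
      intro j
      cases j with
      | zero =>
        simpa [List.getElem?_drop, List.getElem?_take, hlt] using hc
      | succ j' =>
        simp only [List.getElem?_drop, List.getElem?_cons_succ]
        congr 1
        omega
    rw [pvWhileA]
    by_cases hp : c = player
    · have hcond : looked < n ∧ PySem.List.pyGet? row (looked : Int) = some player := by
        refine ⟨hlt, ?_⟩; rw [hget, hp]
      rw [dif_pos hcond]
      rw [ih (looked + 1) (align + 1) (by omega) (by omega)]
      rw [hdrop]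
      simp only [pvLead, if_pos hp]
      omega
    · have hcond : ¬ (looked < n ∧ PySem.List.pyGet? row (looked : Int) = some player) := by
        rintro ⟨-, hcc⟩
        rw [hget] at hcc
        exact hp (by simpa using hcc)
      rw [dif_neg hcond]
      rw [hdrop]
      simp [pvLead, hp]

theorem pvFoldlOr {α : Type} (f : α → Bool) : ∀ (l : List α) (b : Bool),
    l.foldl (fun acc x => acc || f x) b = (b || l.any f) := by
  intro l
  induction l with
  | nil => simp
  | cons x xs ih => intro b; simp [List.foldl_cons, ih, Bool.or_assoc]

theorem pvAnyCongrMem {α : Type} (l : List α) (f g : α → Bool)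
    (h : ∀ x ∈ l, f x = g x) : l.any f = l.any g := by
  induction l with
  | nil => rfl
  | cons x xs ih =>
    simp only [List.any_cons]
    rw [h x (by simp), ih (fun y hy => h y (by simp [hy]))]

-- per-row equality: A's per-cell recount equals B's single-counter scan on the first n cells
theorem pvRow_eq (row : List Int) (player : Int) (n : Nat) (hn : n ≤ row.length) :
    pvRowA row player n = pvRunScan player (row.take n) 0 := by
  have hw : (row.take n).length = n := by simp; omega
  have hA : pvRowA row player n = true ↔
      ∃ i < n, row[i]? = some player ∧ pvLead player ((row.take n).drop i) = 5 := by
    unfold pvRowA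
    rw [pvFoldlOr]
    simp only [Bool.false_or, List.any_eq_true, List.mem_range]
    constructor
    · rintro ⟨i, hi, hcond⟩
      by_cases hp : PySem.List.pyGet? row (i : Int) = some player
      · rw [if_pos hp, beq_iff_eq] at hcond
        rw [pvWhileA_eq_lead row player n hn (n - i) i 0 rfl (by omega)] at hcond
        refine ⟨i, hi, ?_, by omega⟩
        simpa using hp
      · rw [if_neg hp] at hcond; exact absurd hcond (by simp)
    · rintro ⟨i, hi, hp, hl⟩
      refine ⟨i, hi, ?_⟩
      have hp' : PySem.List.pyGet? row (i : Int) = some player := by simpa using hp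
      rw [if_pos hp', beq_iff_eq,
        pvWhileA_eq_lead row player n hn (n - i) i 0 rfl (by omega)]
      omega
  have hB : pvRunScan player (row.take n) 0 = true ↔ 5 ≤ pvBest player (row.take n) 0 :=
    pvRunScan_iff_best player (row.take n) 0 (by omega)
  rw [Bool.eq_iff_iff, hA, hB]
  constructor
  · rintro ⟨i, hi, hp, hl⟩
    have := pvLead_drop_le_best player (row.take n) i 0
    omega
  · intro h
    have hex : ∃ i, 5 ≤ pvLead player ((row.take n).drop i) := by
      rcases pvBest_extract player (row.take n) 0 with h1 | ⟨i, hi⟩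
      · exact ⟨0, by simpa using le_trans h h1⟩
      · exact ⟨i, le_trans h hi⟩
    rcases hex with ⟨i, hi⟩
    rcases pvFind5 player (pvLead player ((row.take n).drop i)) hi (row.take n) i rfl with ⟨j, hj, hl5⟩
    have hjlt : j < n := by
      obtain ⟨h1, -⟩ := List.getElem?_eq_some_iff.mp hj
      omega
    refine ⟨j, hjlt, ?_, hl5⟩
    have ht : (row.take n)[j]? = row[j]? := by
      simp [hjlt]
    rw [← ht, hj]

-- ===== VERDICT (by name: the statement is the Claim_ definition above) =====
theorem WinHor_spec : Claim_equal_WinHor := by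
  intro grid player _ hpre
  unfold Spec_WinHor WinHor WinHor_alt
  rw [pvFoldlOr, pvFoldlOr]
  simp only [Bool.false_or]
  apply pvAnyCongrMem
  intro row hrow
  have hn : grid.length ≤ row.length := hpre row hrow
  have hslice : PySem.List.slice row none (some ((grid.length : Nat) : Int)) = row.take grid.length := by
    simp [PySem.List.slice_to]
  rw [hslice]
  exact pvRow_eq row player grid.length hn
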